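-- pv_equiv track=rewrite | github.com/benquick123/code-profiling | code/batch-1/vse-naloge-brez-testov/DN6-M-70.py | omembe
-- ===== SOURCE A (Python) =====
-- def avtor(tvit):
--     return tvit.split(":")[0]
--
-- def omembe(tviti):
--     tvitis={}
--     for tvit in tviti:
--         tvitis[avtor(tvit)]=[]
--     for tvit in tviti:
--         for beseda in tvit.split():
--             if beseda.startswith("@"):
--                 tvitis[avtor(tvit)].append((izloci_besedo(beseda)))
--     return tvitis
--
-- def izloci_besedo(beseda):
--     ok=False
--     while not ok:
--         if not beseda[0].isalnum():
--             beseda=beseda[1:]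
--         elif not beseda[len(beseda)-1].isalnum():
--             beseda=beseda[:-1]
--         else:
--             ok=True
--     return beseda
-- ===== SOURCE B (Python) =====
-- def _jedro(beseda):
--     idx = [i for i, c in enumerate(beseda) if c.isalnum()]
--     return beseda[idx[0]:idx[-1] + 1]
--
-- def omembe(tviti):
--     result = {}
--     for tvit in tviti:
--         a = tvit.split(":")[0]
--         lst = result.setdefault(a, [])
--         for beseda in tvit.split():
--             if beseda.startswith("@"):
--                 lst.append(_jedro(beseda))
--     return result
-- ===== Notes on version B (the rewrite author's own statement) =====
-- stated objective: simpler
-- what changed: B fuses A's two passes over tviti into a single pass that creates each author's list on first sight via dict.setdefault, and strips a mention by computing the first and last alphanumeric positions once and slicing, instead of A's seeding pass plus a loop that peels one character per iteration.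
import Mathlib
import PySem

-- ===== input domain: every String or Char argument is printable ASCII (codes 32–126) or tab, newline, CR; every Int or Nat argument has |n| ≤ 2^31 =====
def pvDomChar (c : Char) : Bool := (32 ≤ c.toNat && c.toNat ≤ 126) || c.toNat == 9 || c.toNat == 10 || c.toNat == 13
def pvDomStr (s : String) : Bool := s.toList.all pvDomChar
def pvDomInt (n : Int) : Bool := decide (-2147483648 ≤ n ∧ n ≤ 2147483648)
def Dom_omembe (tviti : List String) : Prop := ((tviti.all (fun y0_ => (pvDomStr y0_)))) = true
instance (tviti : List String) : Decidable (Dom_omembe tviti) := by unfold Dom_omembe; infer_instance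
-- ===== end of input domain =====

-- B fuses A's two dict passes into one setdefault pass and strips a mention by slicing between the
-- first and last alphanumeric positions instead of peeling one character per loop iteration (objective: simpler).

-- ===== PORT A =====

-- tvit.split(":")[0] : split(":") always yields a nonempty list, so index 0 is its head
def avtor (tvit : String) : String := ((PySem.Str.split? tvit ":").getD []).headD ""

-- the while-loop of izloci_besedo as structural recursion; on [] Python's beseda[0] raises IndexError (excluded by Pre_)
def izlGo : List Char → List Char
  | [] => []
  | c :: rest =>
    if PySem.Chars.isalnum c = false then izlGo rest
    else if PySem.Chars.isalnum ((c :: rest).getLast (List.cons_ne_nil c rest)) = false then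
      izlGo (c :: rest).dropLast
    else c :: rest
  termination_by cs => cs.length
  decreasing_by
  · simp
  · simp

def izloci_besedo (beseda : String) : String := String.ofList (izlGo beseda.toList)

def omembe (tviti : List String) : List (String × List String) :=
  let d0 : PySem.Dict String (List String) :=
    tviti.foldl (fun d tvit => d.insert (avtor tvit) []) PySem.Dict.empty
  (tviti.foldl (fun d tvit =>
      (PySem.Str.split₀ tvit).foldl (fun d beseda =>
        if PySem.Str.startswith beseda "@" then
          d.modify (avtor tvit) [] (fun l => l ++ [izloci_besedo beseda])
        else d) d) d0).items

-- ===== PORT B =====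

-- _jedro: positions of the alphanumeric characters; idx[0]/idx[-1] raise IndexError on [] (excluded by Pre_)
def jedroGo (cs : List Char) : List Char :=
  let idx := ((PySem.List.enumerate cs 0).filter (fun p => PySem.Chars.isalnum p.2)).map (fun p => p.1)
  match PySem.List.pyGet? idx 0, PySem.List.pyGet? idx (-1) with
  | some i, some j => PySem.List.slice cs (some i) (some (j + 1))
  | _, _ => []

def jedro (beseda : String) : String := String.ofList (jedroGo beseda.toList)

def omembe_alt (tviti : List String) : List (String × List String) :=
  (tviti.foldl (fun d tvit =>
      let a := ((PySem.Str.split? tvit ":").getD []).headD ""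
      let d1 := d.setdefault a []
      (PySem.Str.split₀ tvit).foldl (fun d beseda =>
        if PySem.Str.startswith beseda "@" then
          d.modify a [] (fun l => l ++ [jedro beseda])
        else d) d1)
    (PySem.Dict.empty : PySem.Dict String (List String))).items

-- ===== PRECONDITION & SPEC =====
-- Pre_ excludes exactly the inputs on which Python A raises IndexError: a whitespace-separated word
-- starting with "@" that contains no alphanumeric character makes izloci_besedo strip forever and index an empty string.
def Pre_omembe (tviti : List String) : Prop :=
  ∀ t ∈ tviti, ∀ w ∈ PySem.Str.split₀ t,
    PySem.Str.startswith w "@" = true → w.toList.any PySem.Chars.isalnum = true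
instance (tviti : List String) : Decidable (Pre_omembe tviti) := by unfold Pre_omembe; infer_instance

def pvWitness_omembe : List String := ["ana: hej @bob!", "bea: @ana @cyd.", "ana: nic"]

def Spec_omembe (tviti : List String) (out : List (String × List String)) : Prop := out = omembe_alt tviti
instance (tviti : List String) (out : List (String × List String)) : Decidable (Spec_omembe tviti out) := by unfold Spec_omembe; infer_instance

-- ===== CLAIM (what is proved, stated in full; the proofs are below) =====
def Claim_equal_omembe : Prop := ∀ (tviti : List String), Dom_omembe tviti → Pre_omembe tviti → Spec_omembe tviti (omembe tviti)

-- ===== LEMMAS AND PROOFS =====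

-- ---- part 1: the two mention-stripping helpers agree ----

def leadNA (cs : List Char) : Nat := (cs.takeWhile (fun c => !PySem.Chars.isalnum c)).length

def lastAN : List Char → Nat
  | [] => 0
  | _ :: rest => if rest.any PySem.Chars.isalnum then 1 + lastAN rest else 0

def idxL (cs : List Char) (s : Int) : List Int :=
  ((PySem.List.enumerate cs s).filter (fun p => PySem.Chars.isalnum p.2)).map (fun p => p.1)

lemma idxL_cons (c : Char) (cs : List Char) (s : Int) :
    idxL (c :: cs) s = if PySem.Chars.isalnum c then s :: idxL cs (s + 1) else idxL cs (s + 1) := by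
  simp only [idxL, PySem.List.enumerate_cons, List.filter_cons]
  cases h : PySem.Chars.isalnum c <;> simp

lemma idxL_nil_of_no_alnum (cs : List Char) (s : Int) (h : cs.any PySem.Chars.isalnum = false) :
    idxL cs s = [] := by
  induction cs generalizing s with
  | nil => simp [idxL]
  | cons c rest ih =>
    simp only [List.any_cons, Bool.or_eq_false_iff] at h
    rw [idxL_cons, h.1, if_neg (by simp)]
    exact ih _ h.2

lemma idxL_head? (cs : List Char) (s : Int) (h : cs.any PySem.Chars.isalnum = true) :
    (idxL cs s).head? = some (s + (leadNA cs : Int)) := by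
  induction cs generalizing s with
  | nil => simp at h
  | cons c rest ih =>
    rw [idxL_cons]
    cases hc : PySem.Chars.isalnum c with
    | true =>
      have : leadNA (c :: rest) = 0 := by simp [leadNA, hc]
      simp [this]
    | false =>
      have h' : rest.any PySem.Chars.isalnum = true := by
        simpa [hc] using h
      have hl : leadNA (c :: rest) = leadNA rest + 1 := by
        simp [leadNA, hc, Nat.add_comm]
      simp only [Bool.false_eq_true, if_false]
      rw [ih _ h', hl]
      congr 1
      push_cast
      ring

lemma idxL_getLast? (cs : List Char) (s : Int) (h : cs.any PySem.Chars.isalnum = true) :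
    (idxL cs s).getLast? = some (s + (lastAN cs : Int)) := by
  induction cs generalizing s with
  | nil => simp at h
  | cons c rest ih =>
    rw [idxL_cons]
    cases hr : rest.any PySem.Chars.isalnum with
    | true =>
      have hrec : (idxL rest (s + 1)).getLast? = some (s + 1 + (lastAN rest : Int)) := ih _ hr
      have hlast : lastAN (c :: rest) = 1 + lastAN rest := by simp [lastAN, hr]
      cases hil : idxL rest (s + 1) with
      | nil => rw [hil] at hrec; cases hrec
      | cons y ys =>
        rw [hil] at hrec
        cases hc : PySem.Chars.isalnum c with
        | true =>
          rw [if_pos rfl, List.getLast?_cons_cons, hrec, hlast]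
          congr 1
          push_cast
          ring
        | false =>
          simp only [Bool.false_eq_true, if_false, hlast, hrec]
          congr 1; push_cast; ring
    | false =>
      have hc : PySem.Chars.isalnum c = true := by
        simpa [hr] using h
      rw [if_pos hc, idxL_nil_of_no_alnum rest _ hr]
      simp [lastAN, hr]

lemma izlGo_nil_of_no_alnum (cs : List Char) (h : cs.any PySem.Chars.isalnum = false) :
    izlGo cs = [] := by
  induction cs with
  | nil => simp [izlGo]
  | cons c rest ih =>
    simp only [List.any_cons, Bool.or_eq_false_iff] at h
    rw [izlGo, if_pos h.1]
    exact ih h.2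

lemma lastAN_lt_length (cs : List Char) (h : cs ≠ []) : lastAN cs < cs.length := by
  induction cs with
  | nil => simp at h
  | cons c rest ih =>
    cases hr : rest.any PySem.Chars.isalnum with
    | true =>
      have hrne : rest ≠ [] := by rintro rfl; simp at hr
      have := ih hrne
      simp [lastAN, hr]
      omega
    | false => simp [lastAN, hr]

lemma lastAN_of_last_alnum (cs : List Char) (h : cs ≠ [])
    (ha : PySem.Chars.isalnum (cs.getLast h) = true) : lastAN cs = cs.length - 1 := by
  induction cs with
  | nil => simp at h
  | cons c rest ih =>
    rcases eq_or_ne rest [] with rfl | hrne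
    · simp [lastAN]
    · have hgl : (c :: rest).getLast (List.cons_ne_nil c rest) = rest.getLast hrne :=
        List.getLast_cons hrne
      rw [hgl] at ha
      have hr : rest.any PySem.Chars.isalnum = true :=
        List.any_eq_true.mpr ⟨rest.getLast hrne, List.getLast_mem hrne, ha⟩
      have hlen : rest.length ≠ 0 := by simpa using hrne
      have := ih hrne ha
      simp [lastAN, hr, this]
      omega

lemma any_dropLast (cs : List Char) (h : cs ≠ [])
    (hl : PySem.Chars.isalnum (cs.getLast h) = false) :
    cs.dropLast.any PySem.Chars.isalnum = cs.any PySem.Chars.isalnum := by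
  conv_rhs => rw [← List.dropLast_append_getLast h]
  simp [hl]

lemma lastAN_dropLast (cs : List Char) (h : cs ≠ [])
    (hl : PySem.Chars.isalnum (cs.getLast h) = false) : lastAN cs = lastAN cs.dropLast := by
  induction cs with
  | nil => simp at h
  | cons c rest ih =>
    rcases eq_or_ne rest [] with rfl | hrne
    · simp [lastAN]
    · have hgl : (c :: rest).getLast (List.cons_ne_nil c rest) = rest.getLast hrne :=
        List.getLast_cons hrne
      rw [hgl] at hl
      have hdl : (c :: rest).dropLast = c :: rest.dropLast :=
        List.dropLast_cons_of_ne_nil hrne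
      rw [hdl]
      have hany : rest.dropLast.any PySem.Chars.isalnum = rest.any PySem.Chars.isalnum :=
        any_dropLast rest hrne hl
      simp only [lastAN, hany]
      cases hr : rest.any PySem.Chars.isalnum with
      | true => rw [ih hrne hl]
      | false => rfl

-- the slice form of the stripped core, the shared target of both helpers
lemma izlGo_eq_slice (cs : List Char) (h : cs.any PySem.Chars.isalnum = true) :
    izlGo cs = (cs.drop (leadNA cs)).take (lastAN cs + 1 - leadNA cs) := by
  induction hn : cs.length using Nat.strong_induction_on generalizing cs with
  | _ n ih =>
  subst hn
  cases cs with
  | nil => simp at h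
  | cons c rest =>
    cases hc : PySem.Chars.isalnum c with
    | false =>
      have hr : rest.any PySem.Chars.isalnum = true := by
        simpa [hc] using h
      rw [izlGo, if_pos (by simp [hc])]
      rw [ih rest.length (by simp) rest hr rfl]
      have hlead : leadNA (c :: rest) = leadNA rest + 1 := by
        simp [leadNA, hc, Nat.add_comm]
      have hlast : lastAN (c :: rest) = 1 + lastAN rest := by simp [lastAN, hr]
      rw [hlead, hlast]
      simp only [List.drop_succ_cons]
      congr 1
      omega
    | true =>
      have hne : (c :: rest) ≠ [] := List.cons_ne_nil c rest
      have hlead : leadNA (c :: rest) = 0 := by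
        simp [leadNA, hc]
      cases hl : PySem.Chars.isalnum ((c :: rest).getLast hne) with
      | true =>
        rw [izlGo, if_neg (by simp [hc]), if_neg (by simp [hl])]
        rw [hlead, lastAN_of_last_alnum _ hne hl]
        simp
      | false =>
        rw [izlGo, if_neg (by simp [hc]), if_pos (by simp [hl])]
        have hrne : rest ≠ [] := by
          rintro rfl
          simp only [List.getLast_singleton] at hl
          rw [hl] at hc; cases hc
        have hdl : (c :: rest).dropLast = c :: rest.dropLast :=
          List.dropLast_cons_of_ne_nil hrne
        have hanyd : (c :: rest).dropLast.any PySem.Chars.isalnum = true := by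
          rw [hdl]; simp [hc]
        have hlen : (c :: rest).dropLast.length < (c :: rest).length := by
          rw [List.length_dropLast]; simp
        rw [ih _ hlen _ hanyd rfl]
        have hleadd : leadNA ((c :: rest).dropLast) = 0 := by
          rw [hdl]; simp [leadNA, hc]
        rw [hleadd, hlead, ← lastAN_dropLast _ hne hl]
        simp only [List.drop_zero, Nat.sub_zero]
        have hlt : lastAN (c :: rest) + 1 ≤ (c :: rest).dropLast.length := by
          have h1 : lastAN (c :: rest) = lastAN ((c :: rest).dropLast) :=
            lastAN_dropLast _ hne hl
          have h2 : lastAN ((c :: rest).dropLast) < (c :: rest).dropLast.length :=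
            lastAN_lt_length _ (by rw [hdl]; exact List.cons_ne_nil _ _)
          omega
        set m := lastAN (c :: rest) + 1 with hm
        conv_rhs => rw [← List.dropLast_append_getLast hne]
        rw [List.take_append_of_le_length hlt]

lemma pyGet?_zero {α : Type} (xs : List α) : PySem.List.pyGet? xs 0 = xs.head? := by
  cases xs <;> simp [PySem.List.pyGet?, PySem.List.pyIdx?]

lemma pyGet?_neg_one {α : Type} (xs : List α) : PySem.List.pyGet? xs (-1) = xs.getLast? := by
  cases xs with
  | nil => simp [PySem.List.pyGet?, PySem.List.pyIdx?]
  | cons a t =>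
    simp only [PySem.List.pyGet?, PySem.List.pyIdx?]
    rw [if_neg (by norm_num), if_pos (by push_cast [List.length_cons]; omega)]
    simp [List.getLast?_eq_getElem?]

lemma jedroGo_eq_izlGo (cs : List Char) : jedroGo cs = izlGo cs := by
  cases h : cs.any PySem.Chars.isalnum with
  | false =>
    rw [izlGo_nil_of_no_alnum cs h]
    simp only [jedroGo]
    rw [show ((PySem.List.enumerate cs 0).filter (fun p => PySem.Chars.isalnum p.2)).map
        (fun p => p.1) = idxL cs 0 from rfl]
    rw [idxL_nil_of_no_alnum cs 0 h]
    simp [pyGet?_zero]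
  | true =>
    simp only [jedroGo]
    rw [show ((PySem.List.enumerate cs 0).filter (fun p => PySem.Chars.isalnum p.2)).map
        (fun p => p.1) = idxL cs 0 from rfl]
    rw [pyGet?_zero, pyGet?_neg_one, idxL_head? cs 0 h, idxL_getLast? cs 0 h]
    simp only [zero_add]
    have hcast : ((lastAN cs : Int) + 1) = ((lastAN cs + 1 : Nat) : Int) := by push_cast; ring
    rw [hcast, PySem.List.slice_natCast, izlGo_eq_slice cs h]

lemma jedro_eq (b : String) : jedro b = izloci_besedo b := by
  simp [jedro, izloci_besedo, jedroGo_eq_izlGo]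

-- ---- part 2: both dict computations have the same keys and the same per-key contents ----

def mensOf (t : String) : List (String × String) :=
  ((PySem.Str.split₀ t).filter (fun b => PySem.Str.startswith b "@")).map
    (fun b => (avtor t, izloci_besedo b))

def allMens (ts : List String) : List (String × String) := ts.flatMap mensOf

lemma inner_eq (a : String) (g : String → String) (d : PySem.Dict String (List String)) (t : String) :
    (PySem.Str.split₀ t).foldl (fun d b =>
        if PySem.Str.startswith b "@" then d.modify a [] (fun l => l ++ [g b]) else d) d
      = (((PySem.Str.split₀ t).filter (fun b => PySem.Str.startswith b "@")).map
          (fun b => (a, g b))).foldl (fun d q => d.modify q.1 [] (fun l => l ++ [q.2])) d := by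
  rw [PySem.List.foldl_if_eq_foldl_filter, List.foldl_map]

lemma foldl_flatMap {α β δ : Type} (g : α → List β) (f : δ → β → δ) (ts : List α) (i : δ) :
    (ts.flatMap g).foldl f i = ts.foldl (fun acc t => (g t).foldl f acc) i := by
  induction ts generalizing i with
  | nil => rfl
  | cons t rest ih => simp [List.flatMap_cons, List.foldl_append, ih]

lemma update_of_subset (s : PySem.Set String) (xs : List String) (h : ∀ x ∈ xs, x ∈ s) :
    PySem.Set.update s xs = s := by
  rw [PySem.Set.update_eq_append_filter]
  have hf : (PySem.Set.ofList xs).filter (fun y => !PySem.Set.contains s y) = [] := by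
    rw [List.filter_eq_nil_iff]
    intro y hy
    have hmem : y ∈ s := h y ((PySem.Set.mem_ofList xs y).mp hy)
    simpa using hmem
  rw [hf, List.append_nil]

-- A's seed pass stores [] under every key it touches
lemma seed_getD (ts : List String) (d : PySem.Dict String (List String)) (k : String)
    (h : d.getD k [] = []) :
    (ts.foldl (fun d t => d.insert (avtor t) []) d).getD k [] = [] := by
  induction ts generalizing d with
  | nil => exact h
  | cons t rest ih =>
    refine ih _ ?_
    rw [PySem.Dict.getD_insert]
    split
    · rfl
    · exact h

def modStep (d : PySem.Dict String (List String)) (q : String × String) :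
    PySem.Dict String (List String) := d.modify q.1 [] (fun l => l ++ [q.2])

-- the normalized one-pass (B) step
def bStep (d : PySem.Dict String (List String)) (t : String) : PySem.Dict String (List String) :=
  (mensOf t).foldl modStep (d.setdefault (avtor t) [])

lemma getD_setdefault_nil (d : PySem.Dict String (List String)) (k k' : String) :
    (d.setdefault k []).getD k' [] = d.getD k' [] := by
  rcases eq_or_ne k' k with rfl | hne
  · exact PySem.Dict.getD_setdefault_self d k' [] []
  · rw [PySem.Dict.getD_eq_get?_getD, PySem.Dict.get?_setdefault_of_ne d [] hne,
      ← PySem.Dict.getD_eq_get?_getD]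

lemma bFold_getD (ts : List String) (d : PySem.Dict String (List String)) (k : String) :
    (ts.foldl bStep d).getD k [] =
      d.getD k [] ++ ((allMens ts).filter (fun q => q.1 == k)).map (fun q => q.2) := by
  induction ts generalizing d with
  | nil => simp [allMens]
  | cons t rest ih =>
    rw [List.foldl_cons, ih]
    have hstep : (bStep d t).getD k [] =
        d.getD k [] ++ ((mensOf t).filter (fun q => q.1 == k)).map (fun q => q.2) := by
      unfold bStep modStep
      rw [PySem.Dict.getD_foldl_modify_append, getD_setdefault_nil]
    rw [hstep]
    simp [allMens, List.flatMap_cons, List.filter_append]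

lemma mensOf_fst (t : String) (q : String × String) (hq : q ∈ mensOf t) : q.1 = avtor t := by
  simp only [mensOf, List.mem_map] at hq
  obtain ⟨b, _, rfl⟩ := hq
  rfl

lemma bFold_keys (ts : List String) (d : PySem.Dict String (List String)) :
    (ts.foldl bStep d).keys = PySem.Set.update d.keys (ts.map avtor) := by
  induction ts generalizing d with
  | nil => simp [PySem.Set.update]
  | cons t rest ih =>
    rw [List.foldl_cons, ih]
    have hkeys : (bStep d t).keys = PySem.Set.add d.keys (avtor t) := by
      unfold bStep modStep
      rw [PySem.Dict.keys_foldl_modify_key (mensOf t) (fun q => q.1) [] (fun _ q l => l ++ [q.2])]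
      have hsd : (d.setdefault (avtor t) []).keys = PySem.Set.add d.keys (avtor t) := by
        rw [PySem.Dict.keys_setdefault, PySem.Set.add_eq_ite]
        by_cases hm : avtor t ∈ d.keys
        · rw [if_pos ((PySem.Dict.contains_iff_mem_keys d (avtor t)).mpr hm), if_pos hm]
        · rw [if_neg (fun hc => hm ((PySem.Dict.contains_iff_mem_keys d (avtor t)).mp hc)),
            if_neg hm]
      rw [hsd]
      refine update_of_subset _ _ ?_
      intro x hx
      obtain ⟨q, hq, rfl⟩ := List.mem_map.mp hx
      rw [mensOf_fst t q hq]
      exact (PySem.Set.mem_add _ _ _).mpr (Or.inr rfl)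
    rw [hkeys, List.map_cons, PySem.Set.update_cons]

lemma allMens_fst_mem (ts : List String) (q : String × String) (hq : q ∈ allMens ts) :
    q.1 ∈ ts.map avtor := by
  simp only [allMens, List.mem_flatMap] at hq
  obtain ⟨t, ht, hqt⟩ := hq
  rw [mensOf_fst t q hqt]
  exact List.mem_map_of_mem ht

-- ---- part 3: assembling the two ports ----

lemma omembe_eq_items (ts : List String) :
    omembe ts = ((allMens ts).foldl modStep
      (ts.foldl (fun d t => d.insert (avtor t) []) PySem.Dict.empty)).items := by
  have h1 : omembe ts = (ts.foldl (fun d t => (mensOf t).foldl modStep d)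
      (ts.foldl (fun d t => d.insert (avtor t) []) PySem.Dict.empty)).items := by
    simp only [omembe]
    congr 1
    refine PySem.List.foldl_congr_mem _ _ _ _ ?_
    intro d t _
    rw [inner_eq (avtor t) izloci_besedo d t]
    rfl
  rw [h1, allMens, foldl_flatMap]

lemma omembe_alt_eq_items (ts : List String) :
    omembe_alt ts = (ts.foldl bStep PySem.Dict.empty).items := by
  simp only [omembe_alt]
  congr 1
  refine PySem.List.foldl_congr_mem _ _ _ _ ?_
  intro d t _
  show (PySem.Str.split₀ t).foldl (fun d b =>
      if PySem.Str.startswith b "@" then d.modify (avtor t) [] (fun l => l ++ [jedro b]) else d)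
      (d.setdefault (avtor t) []) = bStep d t
  rw [inner_eq (avtor t) jedro]
  have hm : ((PySem.Str.split₀ t).filter (fun b => PySem.Str.startswith b "@")).map
      (fun b => (avtor t, jedro b)) = mensOf t := by
    unfold mensOf
    exact List.map_congr_left (fun b _ => by rw [jedro_eq])
  rw [hm]
  rfl

-- ===== VERDICT (by name: the statement is the Claim_ definition above) =====
theorem omembe_spec : Claim_equal_omembe := by
  intro ts _ _
  unfold Spec_omembe
  rw [omembe_eq_items, omembe_alt_eq_items]
  set seed := ts.foldl (fun d t => d.insert (avtor t) []) PySem.Dict.empty with hseed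
  have hkA : ((allMens ts).foldl modStep seed).keys = PySem.Set.ofList (ts.map avtor) := by
    unfold modStep
    rw [PySem.Dict.keys_foldl_modify_key (allMens ts) (fun q => q.1) [] (fun _ q l => l ++ [q.2])]
    have h1 : seed.keys = PySem.Set.ofList (ts.map avtor) := by
      rw [hseed, PySem.Dict.keys_foldl_insert_key ts avtor (fun _ _ => []) PySem.Dict.empty,
        PySem.Dict.keys_empty, PySem.Set.update_nil_left]
    rw [h1]
    refine update_of_subset _ _ ?_
    intro x hx
    obtain ⟨q, hq, rfl⟩ := List.mem_map.mp hx
    exact (PySem.Set.mem_ofList _ _).mpr (allMens_fst_mem ts q hq)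
  have hkB : (ts.foldl bStep PySem.Dict.empty).keys = PySem.Set.ofList (ts.map avtor) := by
    rw [bFold_keys, PySem.Dict.keys_empty, PySem.Set.update_nil_left]
  have hgA : ∀ k, ((allMens ts).foldl modStep seed).getD k [] =
      ((allMens ts).filter (fun q => q.1 == k)).map (fun q => q.2) := by
    intro k
    unfold modStep
    rw [PySem.Dict.getD_foldl_modify_append, hseed,
      seed_getD ts PySem.Dict.empty k (PySem.Dict.getD_empty k []), List.nil_append]
  have hgB : ∀ k, (ts.foldl bStep PySem.Dict.empty).getD k [] =
      ((allMens ts).filter (fun q => q.1 == k)).map (fun q => q.2) := by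
    intro k
    rw [bFold_getD, PySem.Dict.getD_empty, List.nil_append]
  have hndA : ((allMens ts).foldl modStep seed).keys.Nodup := by
    rw [hkA]; exact PySem.Set.nodup_ofList _
  have hndB : (ts.foldl bStep PySem.Dict.empty).keys.Nodup := by
    rw [hkB]; exact PySem.Set.nodup_ofList _
  rw [PySem.Dict.items_eq_map_keys _ hndA [], PySem.Dict.items_eq_map_keys _ hndB [], hkA, hkB]
  refine List.map_congr_left ?_
  intro k _
  rw [hgA, hgB]
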